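-- pv_equiv track=rewrite | github.com/usted/Albert-Sans | venv/lib/python3.11/site-packages/collidoscope/__init__.py | _get_sequential_cluster_ids
-- ===== SOURCE A (Python) =====
-- def _get_sequential_cluster_ids(glyphs):
--     cur_cluster = None
--     sci = 0  # sequential cluster ID
--     scis = []
--     for g in glyphs:
--         if g["cluster"] != cur_cluster:
--             sci += 1
--             cur_cluster = g["cluster"]
--         scis.append(sci)
--     return scis
-- ===== SOURCE B (Python) =====
-- def _get_sequential_cluster_ids(glyphs):
--     # Run-length grouping: scan each maximal run of equal clusters with two
--     # pointers and extend the output by a whole block at once.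
--     keys = [g["cluster"] for g in glyphs]
--     n = len(keys)
--     scis = []
--     sci = 0
--     i = 0
--     while i < n:
--         sci += 1
--         j = i + 1
--         while j < n and keys[j] == keys[i]:
--             j += 1
--         scis.extend([sci] * (j - i))
--         i = j
--     return scis
-- ===== Notes on version B (the rewrite author's own statement) =====
-- stated objective: alternative
-- what changed: Replaces the per-element loop carrying a prev-cluster sentinel by a two-pointer run-length scan over a precomputed key list that extends the output one whole run at a time.
import Mathlib
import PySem

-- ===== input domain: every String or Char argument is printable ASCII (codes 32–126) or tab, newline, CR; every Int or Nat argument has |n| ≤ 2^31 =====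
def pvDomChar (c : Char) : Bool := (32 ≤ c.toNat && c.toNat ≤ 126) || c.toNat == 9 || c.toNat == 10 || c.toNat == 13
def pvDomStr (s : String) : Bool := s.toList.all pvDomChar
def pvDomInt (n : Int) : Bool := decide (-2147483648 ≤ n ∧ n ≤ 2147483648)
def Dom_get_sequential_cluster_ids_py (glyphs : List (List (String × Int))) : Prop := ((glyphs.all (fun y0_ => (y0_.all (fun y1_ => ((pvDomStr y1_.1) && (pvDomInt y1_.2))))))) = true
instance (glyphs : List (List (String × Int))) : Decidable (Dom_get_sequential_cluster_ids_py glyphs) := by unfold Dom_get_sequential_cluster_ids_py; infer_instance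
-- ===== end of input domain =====

-- B differs from A by a run-length (two-pointer) grouping of equal consecutive clusters; same return value.
-- ===== PORT A =====
-- g["cluster"]: dict lookup; raises KeyError when absent (excluded by Pre_), so the
-- default in getD is never reached on admitted inputs.
def pvCluster (g : List (String × Int)) : Int := (PySem.Dict.mk g).getD "cluster" 0

-- one iteration of A's for-loop over state (cur_cluster, sci, scis)
def pvStepA (st : Option Int × Int × List Int) (g : List (String × Int)) :
    Option Int × Int × List Int :=
  let (cur, sci, scis) := st
  if some (pvCluster g) ≠ cur then
    (some (pvCluster g), sci + 1, scis ++ [sci + 1])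
  else
    (cur, sci, scis ++ [sci])

def get_sequential_cluster_ids_py (glyphs : List (List (String × Int))) : List Int :=
  (glyphs.foldl pvStepA (none, 0, [])).2.2

-- ===== PORT B =====
-- outer/inner while loops of Source B: one recursive step per run; the inner pointer
-- advance 'while keys[j] == keys[i]' is takeWhile/dropWhile on the tail.
def pvRuns : List Int → Int → List Int
  | [], _ => []
  | k :: rest, sci =>
      List.replicate ((rest.takeWhile (· == k)).length + 1) (sci + 1)
        ++ pvRuns (rest.dropWhile (· == k)) (sci + 1)
termination_by ks _ => ks.length
decreasing_by
  simpa using Nat.lt_succ_of_le (List.length_dropWhile_le (· == k) rest)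

def get_sequential_cluster_ids_py_alt (glyphs : List (List (String × Int))) : List Int :=
  pvRuns (glyphs.map pvCluster) 0

-- ===== PRECONDITION & SPEC =====
-- Pre_ excludes exactly the glyphs missing a "cluster" key, on which both Pythons raise KeyError.
def Pre_get_sequential_cluster_ids_py (glyphs : List (List (String × Int))) : Prop :=
  ∀ g ∈ glyphs, "cluster" ∈ g.map Prod.fst
instance (glyphs : List (List (String × Int))) : Decidable (Pre_get_sequential_cluster_ids_py glyphs) := by unfold Pre_get_sequential_cluster_ids_py; infer_instance

def pvWitness_get_sequential_cluster_ids_py : (List (List (String × Int))) :=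
  [[("cluster", 3)], [("cluster", 3)], [("cluster", 1)]]

def Spec_get_sequential_cluster_ids_py (glyphs : List (List (String × Int))) (out : List Int) : Prop := out = get_sequential_cluster_ids_py_alt glyphs
instance (glyphs : List (List (String × Int))) (out : List Int) : Decidable (Spec_get_sequential_cluster_ids_py glyphs out) := by unfold Spec_get_sequential_cluster_ids_py; infer_instance

-- ===== CLAIM (what is proved, stated in full; the proofs are below) =====
def Claim_equal_get_sequential_cluster_ids_py : Prop := ∀ (glyphs : List (List (String × Int))), Dom_get_sequential_cluster_ids_py glyphs → Pre_get_sequential_cluster_ids_py glyphs → Spec_get_sequential_cluster_ids_py glyphs (get_sequential_cluster_ids_py glyphs)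

-- ===== LEMMAS AND PROOFS =====

-- A's loop, accumulator-free, over the key list only.
def pvA : List Int → Option Int → Int → List Int
  | [], _, _ => []
  | k :: ks, cur, sci =>
      if some k ≠ cur then (sci + 1) :: pvA ks (some k) (sci + 1)
      else sci :: pvA ks cur sci

theorem pvA_foldl (glyphs : List (List (String × Int)))
    (cur : Option Int) (sci : Int) (acc : List Int) :
    (glyphs.foldl pvStepA (cur, sci, acc)).2.2
      = acc ++ pvA (glyphs.map pvCluster) cur sci := by
  induction glyphs generalizing cur sci acc with
  | nil => simp [pvA]
  | cons g gs ih =>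
      rw [List.foldl_cons, List.map_cons]
      by_cases h : some (pvCluster g) = cur
      · have hs : pvStepA (cur, sci, acc) g = (cur, sci, acc ++ [sci]) := by
          simp [pvStepA, h]
        rw [hs, ih]
        simp [pvA, h]
      · have hs : pvStepA (cur, sci, acc) g
            = (some (pvCluster g), sci + 1, acc ++ [sci + 1]) := by
          simp [pvStepA, h]
        rw [hs, ih]
        simp [pvA, h]

theorem pvA_run (ks : List Int) (k : Int) (sci : Int) :
    pvA ks (some k) sci =
      List.replicate (ks.takeWhile (· == k)).length sci
        ++ pvRuns (ks.dropWhile (· == k)) sci := by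
  induction ks generalizing k sci with
  | nil => simp [pvA, pvRuns]
  | cons k2 rest ih =>
      by_cases h : k2 = k
      · subst h
        simp only [pvA, List.takeWhile_cons, List.dropWhile_cons]
        simp [List.replicate_succ, ih]
      · have hb : (k2 == k) = false := by simp [h]
        have hne : some k2 ≠ some k := by simp [h]
        simp only [pvA]
        rw [if_pos hne, ih k2 (sci + 1)]
        simp [hb, pvRuns, List.replicate_succ]

theorem pvA_eq_runs (ks : List Int) : pvA ks none 0 = pvRuns ks 0 := by
  cases ks with
  | nil => simp [pvA, pvRuns]
  | cons k rest =>
      simp [pvA, pvRuns, pvA_run, List.replicate_succ]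

-- ===== VERDICT (by name: the statement is the Claim_ definition above) =====
theorem get_sequential_cluster_ids_py_spec : Claim_equal_get_sequential_cluster_ids_py := by
  intro glyphs _ _
  unfold Spec_get_sequential_cluster_ids_py get_sequential_cluster_ids_py get_sequential_cluster_ids_py_alt
  rw [pvA_foldl, pvA_eq_runs]
  simp
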